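-- pv_equiv track=rewrite | github.com/linhld0811/covidai | src/utils_v3/common.py | sliced_dict
-- ===== SOURCE A (Python) =====
-- def sliced_dict(Inp_Dict:dict, beg_key=None, end_key=None):
--
--     Out_Dict = {}
--
--     to_beg_slicing = False
--     to_end_slicing = False
--
--     if not beg_key:
--         to_beg_slicing = True
--
--     for k, Value in Inp_Dict.items():
--
--         if k == end_key:    to_end_slicing = True
--         if to_end_slicing:  break
--
--         if to_beg_slicing:  Out_Dict[k] = Value
--         if k == beg_key:    to_beg_slicing = True
--
--
--     if not end_key:
--         to_end_slicing = True
--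
--     if  not to_beg_slicing \
--         or not to_end_slicing :
--             raise Exception('Invalid slice: Inp_Dict[{}:{}]'.format(beg_key, end_key))
--
--     return Out_Dict
-- ===== SOURCE B (Python) =====
-- def sliced_dict(Inp_Dict: dict, beg_key=None, end_key=None):
--     items = list(Inp_Dict.items())
--     keys = [k for k, _ in items]
--     # end boundary: first index whose key equals end_key, else the whole tail if end_key is falsy
--     try:
--         stop = keys.index(end_key)
--         end_ok = True
--     except ValueError:
--         stop = len(items)
--         end_ok = not end_key
--     # begin boundary: start of the slice and whether it is satisfied
--     if not beg_key:
--         start, beg_ok = 0, True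
--     else:
--         try:
--             i = keys.index(beg_key)
--             start, beg_ok = i + 1, i < stop
--         except ValueError:
--             start, beg_ok = 0, False
--     if not (beg_ok and end_ok):
--         raise Exception('Invalid slice: Inp_Dict[{}:{}]'.format(beg_key, end_key))
--     return dict(items[start:stop])
-- ===== Notes on version B (the rewrite author's own statement) =====
-- stated objective: alternative
-- what changed: A's single-pass flag machine (to_beg/to_end booleans with a break) is replaced by computing the two boundary indices with list.index and returning dict(items[start:stop]) via one slice.
import Mathlib
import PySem

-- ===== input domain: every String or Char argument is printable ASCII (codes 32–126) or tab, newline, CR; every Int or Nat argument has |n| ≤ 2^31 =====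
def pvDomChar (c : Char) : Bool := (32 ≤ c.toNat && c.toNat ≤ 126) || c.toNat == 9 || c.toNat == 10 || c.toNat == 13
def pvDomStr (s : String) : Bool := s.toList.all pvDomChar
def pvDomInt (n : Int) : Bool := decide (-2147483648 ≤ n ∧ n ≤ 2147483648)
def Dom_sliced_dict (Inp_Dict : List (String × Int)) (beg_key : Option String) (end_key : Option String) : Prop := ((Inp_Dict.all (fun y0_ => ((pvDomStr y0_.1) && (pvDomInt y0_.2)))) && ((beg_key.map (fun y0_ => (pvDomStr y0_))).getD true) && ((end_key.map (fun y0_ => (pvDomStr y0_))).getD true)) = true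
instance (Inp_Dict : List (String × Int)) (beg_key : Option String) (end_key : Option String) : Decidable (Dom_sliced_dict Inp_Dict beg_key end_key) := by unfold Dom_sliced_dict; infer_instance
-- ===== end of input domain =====

-- B replaces A's single-pass flag machine (to_beg/to_end booleans with a break) by computing the two
-- boundary indices and taking one list slice; same cost, different decomposition.


-- Python truthiness of an Optional[str]: `not x` is true exactly for None and "".
def pvFalsy : Option String → Bool
  | none => true
  | some s => s == ""

-- ===== PORT A =====
-- A's for-loop: state (Out_Dict, to_beg_slicing); returns (Out_Dict, to_beg_slicing, to_end_slicing).
def pvLoopA (beg e : Option String) : List (String × Int) → PySem.Dict String Int → Bool → PySem.Dict String Int × Bool × Bool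
  | [], out, toBeg => (out, toBeg, false)
  | (k, v) :: rest, out, toBeg =>
    if some k == e then (out, toBeg, true)          -- `if k == end_key: to_end = True` then `break`
    else pvLoopA beg e rest
      (if toBeg then out.insert k v else out)       -- `if to_beg: Out_Dict[k] = Value`
      (toBeg || (some k == beg))                    -- `if k == beg_key: to_beg = True`

def sliced_dict (Inp_Dict : List (String × Int)) (beg_key : Option String) (end_key : Option String) : List (String × Int) :=
  let r := pvLoopA beg_key end_key Inp_Dict PySem.Dict.empty (pvFalsy beg_key)
  let toEnd := r.2.2 || pvFalsy end_key             -- `if not end_key: to_end = True`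
  if !r.2.1 || !toEnd then []                       -- Python raises Exception here; Pre_ excludes these inputs
  else r.1.items

-- ===== PORT B =====
-- `keys.index(end_key)` / `keys.index(beg_key)` compare each string key with an Optional[str]:
-- ported as findIdx? with the `some k == key` test (ValueError = none).
def sliced_dict_alt (Inp_Dict : List (String × Int)) (beg_key : Option String) (end_key : Option String) : List (String × Int) :=
  let keys := Inp_Dict.map Prod.fst
  let se := keys.findIdx? (fun k => some k == end_key)
  let stop := match se with | some s => s | none => keys.length
  let endOk := match se with | some _ => true | none => pvFalsy end_key
  let sb :=
    if pvFalsy beg_key then some (0, true)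
    else match keys.findIdx? (fun k => some k == beg_key) with
      | some i => some (i + 1, decide (i < stop))
      | none => none
  match sb with
  | some (start, begOk) =>
    if begOk && endOk then
      -- `dict(items[start:stop])`; start, stop are in [0, len], so take/drop is the exact slice
      (PySem.Dict.ofList ((Inp_Dict.take stop).drop start)).items
    else []                                         -- Python raises Exception; excluded by Pre_
  | none => []                                      -- Python raises Exception; excluded by Pre_

-- ===== PRECONDITION & SPEC =====
-- Pre_ excludes exactly the inputs on which the Python raises its 'Invalid slice' Exception:
-- a truthy end_key absent from the keys, or a truthy beg_key absent or not strictly before the end boundary.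
def Pre_sliced_dict (Inp_Dict : List (String × Int)) (beg_key : Option String) (end_key : Option String) : Prop :=
  (match (Inp_Dict.map Prod.fst).findIdx? (fun k => some k == end_key) with
   | some s => pvFalsy beg_key ||
       ((Inp_Dict.map Prod.fst).findIdx? (fun k => some k == beg_key)).any (fun i => decide (i < s))
   | none => pvFalsy end_key &&
       (pvFalsy beg_key || ((Inp_Dict.map Prod.fst).findIdx? (fun k => some k == beg_key)).isSome)) = true
instance (Inp_Dict : List (String × Int)) (beg_key : Option String) (end_key : Option String) : Decidable (Pre_sliced_dict Inp_Dict beg_key end_key) := by unfold Pre_sliced_dict; infer_instance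

def pvWitness_sliced_dict : (List (String × Int)) × Option String × Option String :=
  ([("a", 1), ("b", 2), ("c", 3)], some "a", some "c")

def Spec_sliced_dict (Inp_Dict : List (String × Int)) (beg_key : Option String) (end_key : Option String) (out : List (String × Int)) : Prop := out = sliced_dict_alt Inp_Dict beg_key end_key
instance (Inp_Dict : List (String × Int)) (beg_key : Option String) (end_key : Option String) (out : List (String × Int)) : Decidable (Spec_sliced_dict Inp_Dict beg_key end_key out) := by unfold Spec_sliced_dict; infer_instance

-- ===== CLAIM (what is proved, stated in full; the proofs are below) =====
def Claim_equal_sliced_dict : Prop := ∀ (Inp_Dict : List (String × Int)) (beg_key : Option String) (end_key : Option String), Dom_sliced_dict Inp_Dict beg_key end_key → Pre_sliced_dict Inp_Dict beg_key end_key → Spec_sliced_dict Inp_Dict beg_key end_key (sliced_dict Inp_Dict beg_key end_key)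

-- ===== LEMMAS AND PROOFS =====

-- A's loop with to_beg already true: it inserts everything up to the first end_key match.
lemma pvLoopA_true (beg e : Option String) :
    ∀ (l : List (String × Int)) (out : PySem.Dict String Int),
      pvLoopA beg e l out true =
        match l.findIdx? (fun p => some p.1 == e) with
        | some s => ((l.take s).foldl (fun d p => d.insert p.1 p.2) out, true, true)
        | none => (l.foldl (fun d p => d.insert p.1 p.2) out, true, false) := by
  intro l
  induction l with
  | nil => intro out; simp [pvLoopA]
  | cons p rest ih =>
    intro out
    obtain ⟨k, v⟩ := p
    by_cases hk : (some k == e) = true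
    · simp [pvLoopA, hk, List.findIdx?_cons]
    · have step : pvLoopA beg e ((k, v) :: rest) out true = pvLoopA beg e rest (out.insert k v) true := by
        simp [pvLoopA, hk]
      rw [step, ih, List.findIdx?_cons]
      simp only [hk, Bool.false_eq_true, if_false]
      cases h : rest.findIdx? (fun p => some p.1 == e) <;> simp [List.take_succ_cons]

-- A's loop with to_beg false: it skips until the first beg_key match (if it comes strictly
-- before the first end_key match), then continues with to_beg true on the rest.
lemma pvLoopA_false (beg e : Option String) :
    ∀ (l : List (String × Int)) (out : PySem.Dict String Int),
      pvLoopA beg e l out false =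
        match l.findIdx? (fun p => some p.1 == e), l.findIdx? (fun p => some p.1 == beg) with
        | some s, some i => if i < s then pvLoopA beg e (l.drop (i + 1)) out true else (out, false, true)
        | some _, none => (out, false, true)
        | none, some i => pvLoopA beg e (l.drop (i + 1)) out true
        | none, none => (out, false, false) := by
  intro l
  induction l with
  | nil => intro out; simp [pvLoopA]
  | cons p rest ih =>
    intro out
    obtain ⟨k, v⟩ := p
    by_cases hk : (some k == e) = true
    · simp only [pvLoopA, hk, if_true, List.findIdx?_cons]
      by_cases hb2 : some k = beg <;>
        cases h2 : rest.findIdx? (fun p => some p.1 == beg) <;> simp [hb2]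
    · by_cases hb : (some k == beg) = true
      · have step : pvLoopA beg e ((k, v) :: rest) out false = pvLoopA beg e rest out true := by
          simp [pvLoopA, hk, hb]
        rw [step, List.findIdx?_cons, List.findIdx?_cons]
        simp only [hk, hb, Bool.false_eq_true, if_false, if_true]
        cases h : rest.findIdx? (fun p => some p.1 == e) <;> simp
      · have step : pvLoopA beg e ((k, v) :: rest) out false = pvLoopA beg e rest out false := by
          simp [pvLoopA, hk, hb]
        rw [step, ih, List.findIdx?_cons, List.findIdx?_cons]
        simp only [hk, hb, Bool.false_eq_true, if_false]
        cases h1 : rest.findIdx? (fun p => some p.1 == e) <;>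
          cases h2 : rest.findIdx? (fun p => some p.1 == beg) <;>
            simp

-- findIdx? through the keys projection.
lemma findIdx?_keys (l : List (String × Int)) (q : Option String) :
    (l.map Prod.fst).findIdx? (fun k => some k == q) = l.findIdx? (fun p => some p.1 == q) := by
  induction l with
  | nil => rfl
  | cons p rest ih => simp [List.findIdx?_cons, ih]

-- dropping n ≤ s elements shifts the first match.
lemma findIdx?_drop_of_le {α : Type} (P : α → Bool) :
    ∀ (l : List α) (n s : Nat), l.findIdx? P = some s → n ≤ s →
      (l.drop n).findIdx? P = some (s - n) := by
  intro l
  induction l with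
  | nil => intro n s h hn; rw [List.findIdx?_nil] at h; exact absurd h (by simp)
  | cons a rest ih =>
    intro n s h hn
    cases n with
    | zero => simpa using h
    | succ m =>
      rw [List.findIdx?_cons] at h
      by_cases ha : P a = true
      · simp [ha] at h; omega
      · simp only [ha, if_false, Bool.false_eq_true] at h
        cases hs : rest.findIdx? P with
        | none => simp [hs] at h
        | some s' =>
          simp [hs] at h
          subst h
          have := ih m s' hs (by omega)
          simpa [Nat.succ_sub_succ] using this

lemma findIdx?_drop_of_none {α : Type} (P : α → Bool) (l : List α) (n : Nat)
    (h : l.findIdx? P = none) : (l.drop n).findIdx? P = none := by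
  rw [List.findIdx?_eq_none_iff] at h ⊢
  exact fun x hx => h x (List.mem_of_mem_drop hx)

-- ===== VERDICT (by name: the statement is the Claim_ definition above) =====
theorem sliced_dict_spec : Claim_equal_sliced_dict := by
  intro d beg e _ hPre
  unfold Spec_sliced_dict
  unfold Pre_sliced_dict at hPre
  simp only [sliced_dict, sliced_dict_alt, findIdx?_keys]
  simp only [findIdx?_keys] at hPre
  by_cases hb : pvFalsy beg = true
  · -- start of the dict: to_beg starts true
    rw [hb]
    simp only [if_true, hb, pvLoopA_true]
    cases hse : d.findIdx? (fun p => some p.1 == e) with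
    | some s =>
      simp [PySem.Dict.ofList, PySem.Dict.update, PySem.Dict.empty]
    | none =>
      simp only [hse] at hPre
      have he : pvFalsy e = true := by
        cases hfe : pvFalsy e <;> simp [hfe] at hPre ⊢
      simp [he, PySem.Dict.ofList, PySem.Dict.update, PySem.Dict.empty, List.length_map]
  · -- truthy beg_key: Pre_ gives a first match at i strictly before the end boundary
    simp only [Bool.not_eq_true] at hb
    rw [hb]
    simp only [Bool.false_eq_true, if_false, pvLoopA_false, hb, Bool.false_or]
    cases hse : d.findIdx? (fun p => some p.1 == e) with
    | some s =>
      simp only [hse] at hPre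
      cases hsb : d.findIdx? (fun p => some p.1 == beg) with
      | none => simp [hsb, hb] at hPre
      | some i =>
        simp [hsb, hb] at hPre
        simp only [hsb, hPre, if_true, pvLoopA_true, decide_eq_true hPre]
        have hdrop := findIdx?_drop_of_le (fun p => some p.1 == e) d (i + 1) s hse (by omega)
        simp [hdrop, List.drop_take, PySem.Dict.ofList, PySem.Dict.update, PySem.Dict.empty]
    | none =>
      simp only [hse] at hPre
      cases hsb : d.findIdx? (fun p => some p.1 == beg) with
      | none => simp [hsb, hb] at hPre
      | some i =>
        have he : pvFalsy e = true := by
          cases hfe : pvFalsy e <;> simp [hfe] at hPre ⊢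
        simp only [hsb, pvLoopA_true, he]
        have hdrop := findIdx?_drop_of_none (fun p => some p.1 == e) d (i + 1) hse
        have hi : i < (d.map Prod.fst).length := by
          have := List.findIdx?_eq_some_iff_findIdx_eq.mp hsb
          simp [List.length_map]; omega
        simp [hdrop, hi, PySem.Dict.ofList, PySem.Dict.update, PySem.Dict.empty,
          List.length_map, List.take_of_length_le (le_refl d.length)]
        intro hcon
        exact absurd hcon (by simp [List.length_map] at hi; omega)
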